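-- pv_equiv track=rewrite | github.com/hackthegist/problem-solving | Hackerrank/2019_윈터코딩_CREMA_Lab/02.py | getMostVisited
-- ===== SOURCE A (Python) =====
-- def getMostVisited(n, sprints):
--     len_sprints = len(sprints) - 1
--     to_accumulate = [0] * (n+2)
--
--     for i in range(len_sprints):
--         if sprints[i] < sprints[i+1]:
--             start, end = sprints[i], sprints[i+1]
--         else:
--             start, end = sprints[i+1], sprints[i]
--         to_accumulate[start] += 1
--         to_accumulate[end+1] -= 1
--
--     visited = [0] * (n+1)
--     inc = 0
--     for i in range(len(visited)):
--         inc += to_accumulate[i]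
--         visited[i] = inc
--
--     return visited.index(max(visited))
-- ===== SOURCE B (Python) =====
-- def getMostVisited(n, sprints):
--     visited = [0] * (n + 1)
--     for a, b in zip(sprints, sprints[1:]):
--         lo, hi = (a, b) if a <= b else (b, a)
--         for pos in range(lo, hi + 1):
--             visited[pos] += 1
--     return visited.index(max(visited))
-- ===== Notes on version B (the rewrite author's own statement) =====
-- stated objective: simpler
-- what changed: Replaces the difference-array plus prefix-sum accumulation pass with direct per-cell marking over each sprint interval on a single visited array, iterating adjacent pairs via zip instead of index arithmetic.
-- outside the precondition, e.g. on getMostVisited(1, [-1, -1]): A returns 0, B returns 1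
import Mathlib
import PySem

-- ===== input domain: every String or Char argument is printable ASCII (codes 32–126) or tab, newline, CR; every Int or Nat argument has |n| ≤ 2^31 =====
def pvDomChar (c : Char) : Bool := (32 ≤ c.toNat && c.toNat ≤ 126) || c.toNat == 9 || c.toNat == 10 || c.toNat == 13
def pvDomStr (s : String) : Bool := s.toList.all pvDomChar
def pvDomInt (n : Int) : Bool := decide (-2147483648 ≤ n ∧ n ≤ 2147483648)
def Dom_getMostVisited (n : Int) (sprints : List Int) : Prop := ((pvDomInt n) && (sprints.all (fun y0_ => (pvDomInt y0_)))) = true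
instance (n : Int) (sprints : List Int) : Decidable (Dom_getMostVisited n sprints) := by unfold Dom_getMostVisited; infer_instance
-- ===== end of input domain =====

-- B replaces A's difference-array + prefix-sum accumulation with direct per-cell marking of each sprint interval (simpler, not faster).


-- Both ports keep Python's mutable zero-filled lists as Arrays (O(1) update); pvAGet/pvASet are
-- xs[i] / xs[i] = v with Python's index rule (negative wraps, out of range = IndexError, the no-op
-- branch is reached only outside Pre_), proved equal to PySem.List.pyGetD/pySetD on toList below.
def pvAGet (a : Array Int) (i : Int) : Int :=
  match PySem.List.pyIdx? a.size i with
  | some k => a.getD k 0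
  | none => 0

def pvASet (a : Array Int) (i : Int) (v : Int) : Array Int :=
  match PySem.List.pyIdx? a.size i with
  | some k => a.setIfInBounds k v
  | none => a

-- ===== PORT A =====
-- one loop iteration of A: to_accumulate[start] += 1; to_accumulate[end+1] -= 1
def pvStepA (acc : Array Int) (a b : Int) : Array Int :=
  let s := if a < b then a else b
  let e := if a < b then b else a
  let acc1 := pvASet acc s (pvAGet acc s + 1)
  pvASet acc1 (e + 1) (pvAGet acc1 (e + 1) - 1)

def getMostVisited (n : Int) (sprints : List Int) : Int :=
  let lenSprints : Int := (sprints.length : Int) - 1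
  let toAcc := (PySem.List.pyRange 0 lenSprints 1).foldl
      (fun acc i => pvStepA acc (PySem.List.pyGetD sprints i 0) (PySem.List.pyGetD sprints (i + 1) 0))
      (Array.replicate (n + 2).toNat 0)
  let visited0 : Array Int := Array.replicate (n + 1).toNat 0
  let st := (PySem.List.pyRange 0 (visited0.size : Int) 1).foldl
      (fun (st : Int × Array Int) i =>
        let inc := st.1 + pvAGet toAcc i
        (inc, pvASet st.2 i inc)) ((0 : Int), visited0)
  match PySem.List.max? st.2.toList (fun x => x) with
  | some m => ((PySem.List.index? st.2.toList m).getD 0 : Nat)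
  | none => 0   -- Python raises ValueError here (empty visited); outside Pre_

-- ===== PORT B =====
-- one loop iteration of B: for pos in range(lo, hi+1): visited[pos] += 1
def pvStepB (v : Array Int) (a b : Int) : Array Int :=
  let lo := if a ≤ b then a else b
  let hi := if a ≤ b then b else a
  (PySem.List.pyRange lo (hi + 1) 1).foldl
    (fun v pos => pvASet v pos (pvAGet v pos + 1)) v

def getMostVisited_alt (n : Int) (sprints : List Int) : Int :=
  let visited := (sprints.zip (PySem.List.slice sprints (some 1) none)).foldl
      (fun v p => pvStepB v p.1 p.2) (Array.replicate (n + 1).toNat 0)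
  match PySem.List.max? visited.toList (fun x => x) with
  | some m => ((PySem.List.index? visited.toList m).getD 0 : Nat)
  | none => 0   -- Python raises ValueError here (empty visited); outside Pre_

-- ===== PRECONDITION & SPEC =====
-- Pre_ excludes n < 0 (A's max() of the empty visited list raises ValueError) and, when there are at
-- least two sprint stops (with fewer no indexing happens and any values are fine), stops outside [0, n]:
-- there A raises IndexError or returns a value only through Python's negative-index wraparound, an
-- accident of the list representation that the two implementations realise differently.
def Pre_getMostVisited (n : Int) (sprints : List Int) : Prop :=
  0 ≤ n ∧ (sprints.length ≤ 1 ∨ ∀ s ∈ sprints, 0 ≤ s ∧ s ≤ n)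
instance (n : Int) (sprints : List Int) : Decidable (Pre_getMostVisited n sprints) := by
  unfold Pre_getMostVisited; infer_instance
def pvWitness_getMostVisited : Int × List Int := (3, [1, 3, 0])

def Spec_getMostVisited (n : Int) (sprints : List Int) (out : Int) : Prop := out = getMostVisited_alt n sprints
instance (n : Int) (sprints : List Int) (out : Int) : Decidable (Spec_getMostVisited n sprints out) := by unfold Spec_getMostVisited; infer_instance

-- ===== CLAIM (what is proved, stated in full; the proofs are below) =====
def Claim_equal_getMostVisited : Prop := ∀ (n : Int) (sprints : List Int), Dom_getMostVisited n sprints → Pre_getMostVisited n sprints → Spec_getMostVisited n sprints (getMostVisited n sprints)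


-- ===== LEMMAS AND PROOFS =====
-- list-level copies of the two loop bodies (the proofs work on these; bridges below)
def pvStepAL (acc : List Int) (a b : Int) : List Int :=
  let s := if a < b then a else b
  let e := if a < b then b else a
  let acc1 := PySem.List.pySetD acc s (PySem.List.pyGetD acc s 0 + 1)
  PySem.List.pySetD acc1 (e + 1) (PySem.List.pyGetD acc1 (e + 1) 0 - 1)
def pvStepBL (v : List Int) (a b : Int) : List Int :=
  let lo := if a ≤ b then a else b
  let hi := if a ≤ b then b else a
  (PySem.List.pyRange lo (hi + 1) 1).foldl
    (fun v pos => PySem.List.pySetD v pos (PySem.List.pyGetD v pos 0 + 1)) v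

lemma pvAGet_eq (a : Array Int) (i : Int) : pvAGet a i = PySem.List.pyGetD a.toList i 0 := by
  unfold pvAGet PySem.List.pyGetD PySem.List.pyGet?
  rw [Array.length_toList]
  cases h : PySem.List.pyIdx? a.size i <;>
    simp [Array.getD_eq_getD_getElem?]

lemma pvASet_toList (a : Array Int) (i : Int) (v : Int) :
    (pvASet a i v).toList = PySem.List.pySetD a.toList i v := by
  unfold pvASet PySem.List.pySetD PySem.List.pySet?
  rw [Array.length_toList]
  cases h : PySem.List.pyIdx? a.size i <;>
    simp [Array.toList_setIfInBounds]

lemma pvStepA_toList (acc : Array Int) (a b : Int) :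
    (pvStepA acc a b).toList = pvStepAL acc.toList a b := by
  simp only [pvStepA, pvStepAL, pvASet_toList, pvAGet_eq]

lemma pvStepB_toList (v : Array Int) (a b : Int) :
    (pvStepB v a b).toList = pvStepBL v.toList a b := by
  unfold pvStepB pvStepBL
  exact (List.foldl_hom Array.toList
    (fun w pos => by simp only [pvASet_toList, pvAGet_eq])).symm

def pvS (m : Nat) (l : List Int) : Int := ((List.range m).map (fun i => l.getD i 0)).sum
lemma pv_sum_set (l : List Int) (j : Nat) (x : Int) (hj : j < l.length) (m : Nat) :
    pvS m (l.set j x) = pvS m l + (if j < m then x - l.getD j 0 else 0) := by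
  induction m with
  | zero => simp [pvS]
  | succ k ih =>
    simp only [pvS, List.range_succ, List.map_append, List.sum_append, List.map_cons, List.map_nil,
      List.sum_cons, List.sum_nil] at *
    rw [ih]
    rcases eq_or_ne j k with h | h
    · subst h; simp [List.getD, hj]
    · rw [List.getD, List.getD, List.getElem?_set_ne h]
      simp only [List.getD]
      split_ifs with h1 h2 h3 <;> omega
lemma pv_mark_len (r : List Int) (v : List Int) :
    (r.foldl (fun v pos => PySem.List.pySetD v pos (PySem.List.pyGetD v pos 0 + 1)) v).length = v.length := by
  induction r generalizing v with
  | nil => rfl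
  | cons a t ih => simp only [List.foldl_cons]; rw [ih, PySem.List.length_pySetD]
lemma pv_getD_set (l : List Int) (j : Nat) (x : Int) (hj : j < l.length) (p : Nat) :
    (l.set j x).getD p 0 = if p = j then x else l.getD p 0 := by
  rcases eq_or_ne p j with h | h
  · subst h; simp [List.getD, hj]
  · simp [List.getD, List.getElem?_set_ne (Ne.symm h), h]
lemma pv_pySet_getD (w : List Int) (j x : Int) (h0 : 0 ≤ j) (hj : j < (w.length : Int)) (p : Nat) :
    (PySem.List.pySetD w j x).getD p 0 = if (p : Int) = j then x else w.getD p 0 := by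
  rw [PySem.List.pySetD_of_nonneg w x h0, pv_getD_set _ _ _ (by omega)]
  congr 1
  simp only [eq_iff_iff]; omega
lemma pv_pyGetD (w : List Int) (j : Int) (h0 : 0 ≤ j) (hj : j < (w.length : Int)) :
    PySem.List.pyGetD w j 0 = w.getD j.toNat 0 := by
  rw [PySem.List.pyGetD_eq_getElem w 0 h0 hj, List.getD_eq_getElem _ _ (by omega)]
lemma pv_mark_getD (v : List Int) (lo hi : Int) (hlo : 0 ≤ lo) (hhi : hi < (v.length : Int)) (p : Nat) :
    ((PySem.List.pyRange lo (hi + 1) 1).foldl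
        (fun v pos => PySem.List.pySetD v pos (PySem.List.pyGetD v pos 0 + 1)) v).getD p 0
      = v.getD p 0 + (if lo ≤ (p : Int) ∧ (p : Int) ≤ hi then 1 else 0) := by
  generalize ht : (hi + 1 - lo).toNat = t
  induction t generalizing hi with
  | zero =>
    rw [PySem.List.pyRange_one_eq_nil (by omega)]
    have : ¬ (lo ≤ (p : Int) ∧ (p : Int) ≤ hi) := by omega
    simp [this]
  | succ k ih =>
    have hlh : lo ≤ hi := by omega
    have h0hi : 0 ≤ hi := le_trans hlo hlh
    rw [PySem.List.pyRange_one_succ_right hlh, List.foldl_append]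
    simp only [List.foldl_cons, List.foldl_nil]
    have hw := ih (hi - 1) (by omega) (by omega)
    rw [show hi - 1 + 1 = hi by ring] at hw
    set w := (PySem.List.pyRange lo hi 1).foldl
        (fun v pos => PySem.List.pySetD v pos (PySem.List.pyGetD v pos 0 + 1)) v with hwdef
    have hwlen : w.length = v.length := pv_mark_len _ _
    rw [pv_pySet_getD w hi _ h0hi (by omega),
       pv_pyGetD w hi h0hi (by omega)]
    rcases eq_or_ne ((p : Int)) hi with he | he
    · rw [if_pos he]
      have hpt : hi.toNat = p := by omega
      rw [hpt, hw]
      have h1 : lo ≤ (p : Int) ∧ (p : Int) ≤ hi := by omega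
      rw [if_pos h1]
      split_ifs <;> omega
    · rw [if_neg he, hw]
      split_ifs <;> omega
lemma pv_stepA_len (acc : List Int) (a b : Int) : (pvStepAL acc a b).length = acc.length := by
  simp [pvStepAL, PySem.List.length_pySetD]

lemma pv_stepB_len (v : List Int) (a b : Int) : (pvStepBL v a b).length = v.length := by
  unfold pvStepBL; exact pv_mark_len _ _

lemma pv_diff_sum (n : Int) (acc : List Int) (s e : Int) (hacc : acc.length = (n + 2).toNat)
    (hn : 0 ≤ n) (hs : 0 ≤ s) (hse : s ≤ e) (he : e ≤ n) (p : Nat) (_hp : p < (n + 1).toNat) :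
    pvS (p + 1) (PySem.List.pySetD (PySem.List.pySetD acc s (PySem.List.pyGetD acc s 0 + 1)) (e + 1)
        (PySem.List.pyGetD (PySem.List.pySetD acc s (PySem.List.pyGetD acc s 0 + 1)) (e + 1) 0 - 1))
      = pvS (p + 1) acc + (if s ≤ (p : Int) ∧ (p : Int) ≤ e then 1 else 0) := by
  have hlen : ((acc.length : Int)) = n + 2 := by rw [hacc]; exact Int.toNat_of_nonneg (by omega)
  have e1 : PySem.List.pySetD acc s (PySem.List.pyGetD acc s 0 + 1)
      = acc.set s.toNat (acc.getD s.toNat 0 + 1) := by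
    rw [PySem.List.pySetD_of_nonneg acc _ hs, pv_pyGetD acc s hs (by omega)]
  rw [e1]
  set acc1 := acc.set s.toNat (acc.getD s.toNat 0 + 1) with h1
  have hl1 : acc1.length = acc.length := by rw [h1, List.length_set]
  have e2 : PySem.List.pySetD acc1 (e + 1) (PySem.List.pyGetD acc1 (e + 1) 0 - 1)
      = acc1.set (e + 1).toNat (acc1.getD (e + 1).toNat 0 - 1) := by
    rw [PySem.List.pySetD_of_nonneg acc1 _ (by omega), pv_pyGetD acc1 (e + 1) (by omega) (by omega)]
  rw [e2]
  rw [pv_sum_set acc1 _ _ (by omega), h1, pv_sum_set acc _ _ (by omega)]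
  split_ifs <;> omega

lemma pv_stepA_sum (n : Int) (acc : List Int) (a b : Int) (hacc : acc.length = (n + 2).toNat)
    (hn : 0 ≤ n) (ha : 0 ≤ a ∧ a ≤ n) (hb : 0 ≤ b ∧ b ≤ n) (p : Nat) (hp : p < (n + 1).toNat) :
    pvS (p + 1) (pvStepAL acc a b)
      = pvS (p + 1) acc + (if (min a b) ≤ (p : Int) ∧ (p : Int) ≤ (max a b) then 1 else 0) := by
  unfold pvStepAL
  by_cases hab : a < b
  · simp only [if_pos hab]
    rw [pv_diff_sum n acc a b hacc hn ha.1 (le_of_lt hab) hb.2 p hp,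
      min_eq_left (le_of_lt hab), max_eq_right (le_of_lt hab)]
  · simp only [if_neg hab]
    rw [pv_diff_sum n acc b a hacc hn hb.1 (by omega) ha.2 p hp,
      min_eq_right (by omega), max_eq_left (by omega)]

lemma pv_stepB_getD (n : Int) (v : List Int) (a b : Int) (hv : v.length = (n + 1).toNat)
    (hn : 0 ≤ n) (ha : 0 ≤ a ∧ a ≤ n) (hb : 0 ≤ b ∧ b ≤ n) (p : Nat) :
    (pvStepBL v a b).getD p 0
      = v.getD p 0 + (if (min a b) ≤ (p : Int) ∧ (p : Int) ≤ (max a b) then 1 else 0) := by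
  have hlen : ((v.length : Int)) = n + 1 := by rw [hv]; exact Int.toNat_of_nonneg (by omega)
  unfold pvStepBL
  by_cases hab : a ≤ b
  · simp only [if_pos hab]
    rw [pv_mark_getD v a b ha.1 (by omega) p, min_eq_left hab, max_eq_right hab]
  · simp only [if_neg hab]
    rw [pv_mark_getD v b a hb.1 (by omega) p, min_eq_right (by omega), max_eq_left (by omega)]
lemma pv_S_replicate (m k : Nat) : pvS m (List.replicate k (0 : Int)) = 0 := by
  simp [pvS, List.getD]

lemma pv_S_succ (m : Nat) (l : List Int) : pvS (m + 1) l = pvS m l + l.getD m 0 := by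
  simp [pvS, List.range_succ]

lemma pv_key (n : Int) (hn : 0 ≤ n) :
    ∀ (P : List (Int × Int)), (∀ q ∈ P, ((0 : Int) ≤ q.1 ∧ q.1 ≤ n) ∧ ((0 : Int) ≤ q.2 ∧ q.2 ≤ n)) →
    ∀ acc v, acc.length = (n + 2).toNat → v.length = (n + 1).toNat →
    (∀ p : Nat, p < (n + 1).toNat → v.getD p 0 = pvS (p + 1) acc) →
    (P.foldl (fun acc q => pvStepAL acc q.1 q.2) acc).length = (n + 2).toNat ∧
    (P.foldl (fun v q => pvStepBL v q.1 q.2) v).length = (n + 1).toNat ∧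
    ∀ p : Nat, p < (n + 1).toNat →
      (P.foldl (fun v q => pvStepBL v q.1 q.2) v).getD p 0
        = pvS (p + 1) (P.foldl (fun acc q => pvStepAL acc q.1 q.2) acc) := by
  intro P
  induction P with
  | nil => intro _ acc v h1 h2 h3; exact ⟨h1, h2, fun p hp => h3 p hp⟩
  | cons q t ih =>
    intro hP acc v h1 h2 h3
    have hq := hP q (by simp)
    have hT : ∀ r ∈ t, ((0 : Int) ≤ r.1 ∧ r.1 ≤ n) ∧ ((0 : Int) ≤ r.2 ∧ r.2 ≤ n) :=
      fun r hr => hP r (by simp [hr])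
    simp only [List.foldl_cons]
    refine ih hT (pvStepAL acc q.1 q.2) (pvStepBL v q.1 q.2)
      (by rw [pv_stepA_len, h1]) (by rw [pv_stepB_len, h2]) (fun p hp => ?_)
    rw [pv_stepB_getD n v q.1 q.2 h2 hn hq.1 hq.2 p,
      pv_stepA_sum n acc q.1 q.2 h1 hn hq.1 hq.2 p hp, h3 p hp]

lemma pv_pairs_eq (sprints : List Int) :
    (PySem.List.pyRange 0 ((sprints.length : Int) - 1) 1).map
      (fun i => (PySem.List.pyGetD sprints i 0, PySem.List.pyGetD sprints (i + 1) 0))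
      = sprints.zip (sprints.drop 1) := by
  apply List.ext_getElem
  · simp only [List.length_map, PySem.List.length_pyRange_one, List.length_zip, List.length_drop]
    omega
  · intro i h1 h2
    simp only [List.getElem_map, PySem.List.getElem_pyRange_one, List.getElem_zip, List.getElem_drop]
    have hi : i < sprints.length - 1 := by
      simp [PySem.List.length_pyRange_one] at h1; omega
    rw [show (0 : Int) + (i : Int) = ((i : Nat) : Int) by ring,
      show (((i : Nat) : Int) + 1) = (((i + 1 : Nat)) : Int) by push_cast; ring]
    simp only [PySem.List.pyGetD_natCast]
    rw [List.getD_eq_getElem _ _ (by omega), List.getD_eq_getElem _ _ (by omega)]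
    have : 1 + i = i + 1 := by omega
    simp [this]

lemma pv_prefix_pass (acc v0 : List Int) (m : Nat) (hm : m ≤ v0.length) :
    ((PySem.List.pyRange 0 (m : Int) 1).foldl
        (fun (st : Int × List Int) i =>
          (st.1 + PySem.List.pyGetD acc i 0,
           PySem.List.pySetD st.2 i (st.1 + PySem.List.pyGetD acc i 0))) ((0 : Int), v0)).1
      = pvS m acc ∧
    ((PySem.List.pyRange 0 (m : Int) 1).foldl
        (fun (st : Int × List Int) i =>
          (st.1 + PySem.List.pyGetD acc i 0,
           PySem.List.pySetD st.2 i (st.1 + PySem.List.pyGetD acc i 0))) ((0 : Int), v0)).2.length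
      = v0.length ∧
    ∀ p : Nat,
      ((PySem.List.pyRange 0 (m : Int) 1).foldl
          (fun (st : Int × List Int) i =>
            (st.1 + PySem.List.pyGetD acc i 0,
             PySem.List.pySetD st.2 i (st.1 + PySem.List.pyGetD acc i 0))) ((0 : Int), v0)).2.getD p 0
        = if p < m then pvS (p + 1) acc else v0.getD p 0 := by
  induction m with
  | zero =>
    rw [show ((0 : Nat) : Int) = 0 by rfl, PySem.List.pyRange_one_eq_nil (by omega)]
    refine ⟨by simp [pvS], rfl, fun p => by simp⟩
  | succ m ih =>
    have ih := ih (by omega)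
    rw [show (((m + 1 : Nat)) : Int) = (m : Int) + 1 by push_cast; ring,
      PySem.List.pyRange_one_succ_right (by omega), List.foldl_append]
    simp only [List.foldl_cons, List.foldl_nil]
    refine ⟨?_, ?_, ?_⟩
    · simp only [ih.1, PySem.List.pyGetD_natCast, pv_S_succ]
    · rw [PySem.List.length_pySetD, ih.2.1]
    · intro p
      rw [pv_pySet_getD _ _ _ (by omega)
        (by rw [ih.2.1]; exact_mod_cast (show m < v0.length by omega))]
      rcases eq_or_ne p m with h | h
      · subst h
        rw [if_pos rfl, if_pos (by omega), ih.1]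
        simp [PySem.List.pyGetD_natCast, pv_S_succ]
      · rw [if_neg (by exact_mod_cast h), ih.2.2 p]
        split_ifs with h1 h2 h3 <;> first | rfl | omega


-- ===== VERDICT (by name: the statement is the Claim_ definition above) =====
theorem getMostVisited_spec : Claim_equal_getMostVisited := by
  unfold Claim_equal_getMostVisited
  intro n sprints _ hpre
  have hpre' : 0 ≤ n ∧ (sprints.length ≤ 1 ∨ ∀ s ∈ sprints, 0 ≤ s ∧ s ≤ n) := hpre
  obtain ⟨hn, hrest⟩ := hpre'
  have hP : ∀ q ∈ sprints.zip (sprints.drop 1), ((0 : Int) ≤ q.1 ∧ q.1 ≤ n) ∧ ((0 : Int) ≤ q.2 ∧ q.2 ≤ n) := by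
    intro q hq
    rcases hrest with hlen | hb
    · exfalso
      rcases sprints with _ | ⟨a, t⟩
      · simp at hq
      · rcases t with _ | ⟨b, t⟩
        · simp at hq
        · simp at hlen
    · exact ⟨hb q.1 (List.of_mem_zip hq).1, hb q.2 (List.mem_of_mem_drop (List.of_mem_zip hq).2)⟩
  unfold Spec_getMostVisited getMostVisited getMostVisited_alt
  simp only [Array.size_replicate]
  have hsl : PySem.List.slice sprints (some 1) none = sprints.drop 1 := by
    rw [PySem.List.slice_from_one, ← List.drop_one]
  rw [hsl]
  -- bridge the Array folds to their list-level images
  set toAccA := List.foldl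
      (fun acc i => pvStepA acc (PySem.List.pyGetD sprints i 0) (PySem.List.pyGetD sprints (i + 1) 0))
      (Array.replicate (n + 2).toNat 0) (PySem.List.pyRange 0 ((sprints.length : Int) - 1) 1) with hAccA
  set toAcc := List.foldl
      (fun acc i => pvStepAL acc (PySem.List.pyGetD sprints i 0) (PySem.List.pyGetD sprints (i + 1) 0))
      (List.replicate (n + 2).toNat 0) (PySem.List.pyRange 0 ((sprints.length : Int) - 1) 1) with hAcc
  have hAccL : toAccA.toList = toAcc := by
    rw [hAccA, hAcc, ← Array.toList_replicate (n := (n + 2).toNat) (a := (0 : Int))]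
    exact (List.foldl_hom Array.toList (fun acc i => (pvStepA_toList acc _ _).symm)).symm
  have hstL : (List.foldl (fun (st : Int × Array Int) i =>
        (st.1 + pvAGet toAccA i, pvASet st.2 i (st.1 + pvAGet toAccA i)))
        ((0 : Int), Array.replicate (n + 1).toNat 0) (PySem.List.pyRange 0 (((n + 1).toNat : Int)) 1)).2.toList
      = (List.foldl (fun (st : Int × List Int) i =>
        (st.1 + PySem.List.pyGetD toAcc i 0, PySem.List.pySetD st.2 i (st.1 + PySem.List.pyGetD toAcc i 0)))
        ((0 : Int), List.replicate (n + 1).toNat 0) (PySem.List.pyRange 0 (((n + 1).toNat : Int)) 1)).2 := by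
    have hh := List.foldl_hom (f := fun (st : Int × Array Int) => (st.1, st.2.toList))
      (g₁ := fun (st : Int × Array Int) i =>
        (st.1 + pvAGet toAccA i, pvASet st.2 i (st.1 + pvAGet toAccA i)))
      (g₂ := fun (st : Int × List Int) i =>
        (st.1 + PySem.List.pyGetD toAcc i 0, PySem.List.pySetD st.2 i (st.1 + PySem.List.pyGetD toAcc i 0)))
      (l := PySem.List.pyRange 0 (((n + 1).toNat : Int)) 1)
      (init := ((0 : Int), Array.replicate (n + 1).toNat 0))
      (fun st i => by simp only [pvASet_toList, pvAGet_eq, hAccL])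
    have hh2 := congrArg Prod.snd hh
    simpa [Array.toList_replicate] using hh2.symm
  have hB : ((sprints.zip (sprints.drop 1)).foldl (fun v p => pvStepB v p.1 p.2)
        (Array.replicate (n + 1).toNat 0)).toList
      = (sprints.zip (sprints.drop 1)).foldl (fun v p => pvStepBL v p.1 p.2)
        (List.replicate (n + 1).toNat 0) := by
    rw [← Array.toList_replicate (n := (n + 1).toNat) (a := (0 : Int))]
    exact (List.foldl_hom Array.toList (fun v p => (pvStepB_toList v _ _).symm)).symm
  rw [hstL, hB]
  -- from here on the goal is pure list-level; repeat the list proof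
  have hA2 : toAcc = List.foldl (fun acc q => pvStepAL acc q.1 q.2)
      (List.replicate (n + 2).toNat 0) (sprints.zip (sprints.drop 1)) := by
    rw [hAcc, ← pv_pairs_eq, List.foldl_map]
  have hkey := pv_key n hn (sprints.zip (sprints.drop 1)) hP
    (List.replicate (n + 2).toNat 0) (List.replicate (n + 1).toNat 0)
    (by simp) (by simp)
    (fun p hp => by rw [pv_S_replicate]; simp [List.getD])
  have hPP := pv_prefix_pass toAcc (List.replicate (n + 1).toNat 0) (n + 1).toNat (by simp)
  have hVV : (List.foldl (fun (st : Int × List Int) i =>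
        (st.1 + PySem.List.pyGetD toAcc i 0, PySem.List.pySetD st.2 i (st.1 + PySem.List.pyGetD toAcc i 0)))
        ((0 : Int), List.replicate (n + 1).toNat 0) (PySem.List.pyRange 0 (((n + 1).toNat : Int)) 1)).2
      = List.foldl (fun v p => pvStepBL v p.1 p.2) (List.replicate (n + 1).toNat 0) (sprints.zip (sprints.drop 1)) := by
    apply List.ext_getElem
    · rw [hPP.2.1, hkey.2.1, List.length_replicate]
    · intro i h1 h2
      have hiN : i < (n + 1).toNat := by
        have hx := hPP.2.1
        rw [hx, List.length_replicate] at h1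
        exact h1
      rw [← List.getD_eq_getElem _ 0 h1, ← List.getD_eq_getElem _ 0 h2,
        hPP.2.2 i, if_pos hiN, hkey.2.2 i hiN, hA2]
  rw [hVV]
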